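-- pv_equiv track=rewrite | github.com/JLuizRF/Pascal | Pascal - Shared code.py | is_email_forbidden
-- ===== SOURCE A (Python) =====
-- def is_email_forbidden(from_email):
--     """
--     Checks if the extracted 'From' email contains any forbidden domains.
--     """
--     forbidden_domains = [
--         "@onfrontiers.com",   # Example of a forbidden domain
--         "@client.com",        # Add other forbidden domains here
--         "@vendor.com"         # Add more domains as needed
--     ]
--
--     for domain in forbidden_domains:
--         if from_email.endswith(domain):
--             return True
--     return False
-- ===== SOURCE B (Python) =====
-- def is_email_forbidden(from_email):
--     """
--     Checks if the extracted 'From' email contains any forbidden domains.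
--     """
--     _local, sep, domain = from_email.rpartition('@')
--     return sep == '@' and domain in {"onfrontiers.com", "client.com", "vendor.com"}
-- ===== Notes on version B (the rewrite author's own statement) =====
-- stated objective: idiomatic
-- what changed: B extracts the domain part after the last at-sign once with rpartition and tests it by set membership, instead of A's loop of per-domain endswith scans over the whole string.
import Mathlib
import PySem

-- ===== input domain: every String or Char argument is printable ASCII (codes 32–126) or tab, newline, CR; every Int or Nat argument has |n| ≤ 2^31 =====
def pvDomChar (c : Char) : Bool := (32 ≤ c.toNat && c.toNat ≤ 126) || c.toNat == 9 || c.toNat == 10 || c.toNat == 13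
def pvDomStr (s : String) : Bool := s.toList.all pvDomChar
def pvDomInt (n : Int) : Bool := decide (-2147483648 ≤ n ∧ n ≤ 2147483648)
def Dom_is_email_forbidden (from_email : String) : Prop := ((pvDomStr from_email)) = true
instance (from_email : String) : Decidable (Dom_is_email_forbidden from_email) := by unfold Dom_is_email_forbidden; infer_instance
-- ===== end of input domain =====

-- B replaces A's loop of per-domain endswith scans by one rpartition parse plus a set lookup (idiomatic).

-- ===== PORT A =====
def is_email_forbidden (from_email : String) : Bool :=
  let forbidden_domains := ["@onfrontiers.com", "@client.com", "@vendor.com"]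
  forbidden_domains.any (fun domain => PySem.Str.endswith from_email domain)

-- ===== PORT B =====
-- tail of rpartition('@'): the segment after the LAST '@' (none if no '@'), as Source B's rpartition computes
def pvTailAfterAt : List Char → Option (List Char)
  | [] => none
  | c :: cs =>
    match pvTailAfterAt cs with
    | some t => some t
    | none => if c = '@' then some cs else none

def is_email_forbidden_alt (from_email : String) : Bool :=
  match pvTailAfterAt from_email.toList with
  | none => false  -- sep ≠ '@'
  | some domain =>
      domain = "onfrontiers.com".toList || domain = "client.com".toList || domain = "vendor.com".toList

-- ===== PRECONDITION & SPEC =====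
def Spec_is_email_forbidden (from_email : String) (out : Bool) : Prop := out = is_email_forbidden_alt from_email
instance (from_email : String) (out : Bool) : Decidable (Spec_is_email_forbidden from_email out) := by unfold Spec_is_email_forbidden; infer_instance

-- ===== CLAIM (what is proved, stated in full; the proofs are below) =====
def Claim_equal_is_email_forbidden : Prop := ∀ (from_email : String), Dom_is_email_forbidden from_email → Spec_is_email_forbidden from_email (is_email_forbidden from_email)

-- ===== LEMMAS AND PROOFS =====

theorem pvTailAfterAt_eq_none_iff (l : List Char) : pvTailAfterAt l = none ↔ '@' ∉ l := by
  induction l with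
  | nil => simp [pvTailAfterAt]
  | cons c cs ih =>
    simp only [pvTailAfterAt, List.mem_cons]
    cases h : pvTailAfterAt cs with
    | some t =>
      constructor
      · intro h'; cases h'
      · intro h'
        have hns : '@' ∉ cs := fun hm => h' (Or.inr hm)
        rw [← ih] at hns
        simp [h] at hns
    | none =>
      have hmem : '@' ∉ cs := ih.mp h
      by_cases hc : c = '@' <;> simp [hc, hmem, eq_comm]

theorem pvTailAfterAt_suffix (d : List Char) (hd : '@' ∉ d) (l : List Char) :
    ('@' :: d <:+ l) ↔ pvTailAfterAt l = some d := by
  induction l with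
  | nil => simp [pvTailAfterAt]
  | cons c cs ih =>
    rw [List.suffix_cons_iff]
    simp only [pvTailAfterAt]
    cases h : pvTailAfterAt cs with
    | some t =>
      have hmem : '@' ∈ cs := by
        by_contra hn
        rw [← pvTailAfterAt_eq_none_iff] at hn
        simp [hn] at h
      constructor
      · rintro (heq | hsuf)
        · exact absurd (heq.symm ▸ hmem : '@' ∈ ('@' :: d).tail) (by simpa using hd)
        · rw [ih] at hsuf; rw [h] at hsuf; exact hsuf
      · intro ht
        right
        rw [ih, h]; exact ht
    | none =>
      have hmem : '@' ∉ cs := (pvTailAfterAt_eq_none_iff cs).mp h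
      by_cases hc : c = '@'
      · subst hc
        simp only [↓reduceIte, Option.some.injEq]
        constructor
        · rintro (heq | hsuf)
          · exact ((List.cons_eq_cons.mp heq).2).symm
          · exact absurd (hsuf.subset (by simp)) hmem
        · intro hdc; left; rw [hdc]
      · simp only [if_neg hc]
        constructor
        · rintro (heq | hsuf)
          · exact absurd ((List.cons.injEq _ _ _ _ ▸ heq).1.symm) hc
          · exact absurd (hsuf.subset (by simp)) hmem
        · intro h'; cases h'

theorem endswith_at (d : List Char) (hd : '@' ∉ d) (l : List Char) :
    PySem.Chars.endswith l ('@' :: d) = (pvTailAfterAt l == some d) := by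
  rw [Bool.eq_iff_iff]
  simp only [beq_iff_eq, PySem.Chars.endswith_iff]
  exact pvTailAfterAt_suffix d hd l

theorem is_email_forbidden_spec : Claim_equal_is_email_forbidden := by
  intro s _
  unfold Spec_is_email_forbidden is_email_forbidden is_email_forbidden_alt
  have h1 := endswith_at "onfrontiers.com".toList (by decide) s.toList
  have h2 := endswith_at "client.com".toList (by decide) s.toList
  have h3 := endswith_at "vendor.com".toList (by decide) s.toList
  have e1 : ("@onfrontiers.com" : String).toList = '@' :: "onfrontiers.com".toList := by decide
  have e2 : ("@client.com" : String).toList = '@' :: "client.com".toList := by decide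
  have e3 : ("@vendor.com" : String).toList = '@' :: "vendor.com".toList := by decide
  simp only [List.any_cons, List.any_nil, PySem.Str.endswith_eq, e1, e2, e3, h1, h2, h3,
    Bool.or_false]
  cases h : pvTailAfterAt s.toList with
  | none => simp
  | some t =>
    rw [Bool.eq_iff_iff]
    simp [Bool.or_assoc]
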